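-- pv_equiv track=rewrite | github.com/philip-le/SGN_app | tests/html_fragment.py | translate_html
-- ===== SOURCE A (Python) =====
-- HTML_ESCAPE_DECODE_TABLE = { "#39"   : "\'",
--                              "quot"  : "\"",
--                              "#34"   : "\"",
--                              "amp"   : "&",
--                              "#38"   : "&",
--                              "lt"    : "<",
--                              "#60"   : "<",
--                              "gt"    : ">",
--                              "#62"   : ">",
--                              "nbsp"  : " ",
--                              "#160"  : " "   }
--
-- def unicode_to_ascii(s):
--     """
--     converts s to an ascii string.
--
--     s: unicode string
--     """
--     ret = ""
--     for ch in s: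
--         try:
--             ach = str(ch)
--             ret += ach
--         except UnicodeEncodeError:
--             ret += "?"
--     return ret
--
-- def translate_html(html_fragment):
--     """
--     Translates a HTML fragment to plain text.
--
--     html_fragment: string (ascii or unicode)
--     returns: string (ascii)
--     """
--     txt = ""                 # translated string
--     parser_reg=""            # parser register
--     parser_state = "TEXT"    # parser state: TEXT, ESCAPE or TAG
--
--     for x in html_fragment:  # process each character in html fragment
--         parser_reg += x
--         if parser_state == "TEXT":   # in TEXT mode.
--             if x == '<':             # does this char start a tag?
--                 parser_state = "TAG"
--             elif x == '&':           # does this char start an escape code?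
--                 parser_state = "ESCAPE"
--             else:                    # otherwise, this is normal text
--                 txt += x             # copy the character as-is to output
--                 parser_reg = ""      # character handled, erase register
--         elif parser_state == "TAG":  # inside an html TAG.
--             if x == '>':             # does this char end the tag?
--                 parser_state = "TEXT"# return to TEXT mode for next character
--
--                 tag = parser_reg     # the complete tag is in the register
--
--                 # translate some tags, ignore all others
--                 if tag[1:-1] == "br" or tag[1:4] == "br ":
--                     txt += "\n"
--                 elif tag == "</table>":
--                     txt += "\n"
--                 elif tag == "<p>":
--                     txt += "\n\n"
--
--                 parser_reg = ""      # tag handled, erase register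
--
--         elif parser_state == "ESCAPE": # inside an ESCAPE code
--             if x == ';':               # does this char end an escape code?
--                 parser_state = "TEXT"  # return to TEXT mode for next character
--
--                 esc = parser_reg[1:-1] # complete escape code is in register
--
--                 if esc in HTML_ESCAPE_DECODE_TABLE:  # try to decode escape code
--                     txt += HTML_ESCAPE_DECODE_TABLE[esc]
--                 else:
--                     txt += " "         # unknown escape code -> space
--
--                 parser_reg = ""      # code handled, erase register
--
--     if ~isinstance(txt, str):
--         txt = unicode_to_ascii(txt)
--
--     return txt
-- ===== SOURCE B (Python) =====
-- HTML_ESCAPE_DECODE_TABLE = { "#39"   : "\'",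
--                              "quot"  : "\"",
--                              "#34"   : "\"",
--                              "amp"   : "&",
--                              "#38"   : "&",
--                              "lt"    : "<",
--                              "#60"   : "<",
--                              "gt"    : ">",
--                              "#62"   : ">",
--                              "nbsp"  : " ",
--                              "#160"  : " "   }
--
-- def translate_html(html_fragment):
--     """Delimiter scanner: peel whole '<...>' / '&...;' chunks instead of a
--     char-by-char state machine with a register."""
--     s = list(html_fragment)
--     out = []
--     while s:
--         c = s[0]
--         if c == '<':
--             try:
--                 k = s.index('>')
--             except ValueError:
--                 break                      # unterminated tag: drop remainder
--             tag = ''.join(s[:k + 1])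
--             if tag[1:-1] == "br" or tag[1:4] == "br ":
--                 out.append("\n")
--             elif tag == "</table>":
--                 out.append("\n")
--             elif tag == "<p>":
--                 out.append("\n\n")
--             s = s[k + 1:]
--         elif c == '&':
--             try:
--                 k = s.index(';')
--             except ValueError:
--                 break                      # unterminated escape: drop remainder
--             esc = ''.join(s[1:k])
--             out.append(HTML_ESCAPE_DECODE_TABLE.get(esc, " "))
--             s = s[k + 1:]
--         else:
--             out.append(c)
--             s = s[1:]
--     return ''.join(out)
-- ===== Notes on version B (the rewrite author's own statement) =====
-- stated objective: alternative
-- what changed: Replaced A's char-by-char three-state parser (TEXT/TAG/ESCAPE with an explicit register string) by a delimiter scanner that peels whole '<...>' and '&...;' chunks with list.index and processes each chunk at once.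
import Mathlib
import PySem

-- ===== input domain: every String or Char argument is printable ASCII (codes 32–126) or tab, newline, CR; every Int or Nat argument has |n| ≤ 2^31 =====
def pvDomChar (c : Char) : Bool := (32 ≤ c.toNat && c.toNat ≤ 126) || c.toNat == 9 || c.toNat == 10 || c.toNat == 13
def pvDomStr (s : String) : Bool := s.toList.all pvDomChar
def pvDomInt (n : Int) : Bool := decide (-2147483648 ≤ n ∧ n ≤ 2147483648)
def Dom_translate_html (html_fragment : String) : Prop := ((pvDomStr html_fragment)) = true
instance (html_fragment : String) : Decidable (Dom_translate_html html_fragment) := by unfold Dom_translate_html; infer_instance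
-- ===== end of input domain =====

-- B replaces A's char-by-char three-state parser (explicit register) by a delimiter
-- scanner that peels whole '<...>' / '&...;' chunks via list.index; same return value.

-- the module-level HTML_ESCAPE_DECODE_TABLE, shared by both Pythons
def escTable : List (List Char × List Char) :=
  [ ("#39".toList, "'".toList), ("quot".toList, "\"".toList), ("#34".toList, "\"".toList),
    ("amp".toList, "&".toList), ("#38".toList, "&".toList), ("lt".toList, "<".toList),
    ("#60".toList, "<".toList), ("gt".toList, ">".toList), ("#62".toList, ">".toList),
    ("nbsp".toList, " ".toList), ("#160".toList, " ".toList) ]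

-- 'esc in TABLE' then 'TABLE[esc]' else ' ' (both Pythons contain this literally)
def escDecode (esc : List Char) : List Char := (escTable.lookup esc).getD [' ']

-- the tag if-chain both Pythons contain literally; tag[1:-1] = (drop 1).dropLast and
-- tag[1:4] = (drop 1).take 3 are exact for these nonnegative/-1 slice bounds
def tagOut (tag : List Char) : List Char :=
  if (tag.drop 1).dropLast = ['b','r'] ∨ (tag.drop 1).take 3 = ['b','r',' '] then ['\n']
  else if tag = "</table>".toList then ['\n']
  else if tag = "<p>".toList then ['\n','\n']
  else []

-- ===== PORT A =====
inductive PState | TEXT | TAG | ESC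
deriving DecidableEq, Repr

-- one iteration of A's for-loop; state = (txt, parser_reg, parser_state)
def stepA (st : List Char × List Char × PState) (x : Char) : List Char × List Char × PState :=
  let txt := st.1; let reg := st.2.1 ++ [x]
  match st.2.2 with
  | .TEXT =>
    if x = '<' then (txt, reg, .TAG)
    else if x = '&' then (txt, reg, .ESC)
    else (txt ++ [x], [], .TEXT)
  | .TAG =>
    if x = '>' then (txt ++ tagOut reg, [], .TEXT)
    else (txt, reg, .TAG)
  | .ESC =>
    if x = ';' then (txt ++ escDecode ((reg.drop 1).dropLast), [], .TEXT)
    else (txt, reg, .ESC)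

-- unicode_to_ascii: str(ch) never raises on these strings, so the loop copies char by char
def unicodeToAscii (s : List Char) : List Char := s.foldl (fun ret ch => ret ++ [ch]) []

def translate_html (html_fragment : String) : String :=
  -- ~isinstance(txt, str) = -2, truthy, so unicode_to_ascii always runs
  String.ofList (unicodeToAscii (html_fragment.toList.foldl stepA ([], [], .TEXT)).1)

-- ===== PORT B =====
def goB : List Char → List Char
  | [] => []
  | c :: rest =>
    if c = '<' then
      match PySem.List.index? (c :: rest) '>' with
      | none => []                                     -- unterminated tag: drop remainder
      | some k =>
        tagOut ((c :: rest).take (k + 1)) ++ goB ((c :: rest).drop (k + 1))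
    else if c = '&' then
      match PySem.List.index? (c :: rest) ';' with
      | none => []                                     -- unterminated escape: drop remainder
      | some k =>
        escDecode (((c :: rest).take k).drop 1) ++ goB ((c :: rest).drop (k + 1))
    else c :: goB rest
termination_by s => s.length
decreasing_by all_goals simp [List.length_drop]

def translate_html_alt (html_fragment : String) : String :=
  String.ofList (goB html_fragment.toList)

-- ===== PRECONDITION & SPEC =====
def Spec_translate_html (html_fragment : String) (out : String) : Prop := out = translate_html_alt html_fragment
instance (html_fragment : String) (out : String) : Decidable (Spec_translate_html html_fragment out) := by unfold Spec_translate_html; infer_instance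

-- ===== CLAIM (what is proved, stated in full; the proofs are below) =====
def Claim_equal_translate_html : Prop := ∀ (html_fragment : String), Dom_translate_html html_fragment → Spec_translate_html html_fragment (translate_html html_fragment)

-- ===== LEMMAS AND PROOFS =====

theorem unicodeToAscii_id (s : List Char) : unicodeToAscii s = s := by
  have h : ∀ (l acc : List Char), l.foldl (fun ret ch => ret ++ [ch]) acc = acc ++ l := by
    intro l; induction l with
    | nil => simp
    | cons c t ih => intro acc; simp [List.foldl, ih]
  simpa [unicodeToAscii] using h s []

-- swallowing until '>' in TAG state
theorem foldl_tag (s : List Char) : ∀ (reg txt : List Char),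
    List.foldl stepA (txt, reg, .TAG) s =
      match PySem.List.index? s '>' with
      | none => (txt, reg ++ s, .TAG)
      | some k => List.foldl stepA (txt ++ tagOut (reg ++ s.take (k + 1)), [], .TEXT) (s.drop (k + 1)) := by
  induction s with
  | nil => intro reg txt; simp
  | cons c t ih =>
    intro reg txt
    by_cases hc : c = '>'
    · subst hc
      rw [PySem.List.index?_cons_self]
      simp [List.foldl, stepA]
    · rw [PySem.List.index?_cons_of_ne t hc]
      have hstep : List.foldl stepA (txt, reg, .TAG) (c :: t)
          = List.foldl stepA (txt, reg ++ [c], .TAG) t := by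
        simp [List.foldl, stepA, hc]
      rw [hstep, ih]
      cases hk : PySem.List.index? t '>' with
      | none => simp
      | some k => simp [List.take_succ_cons, List.drop_succ_cons]

-- swallowing until ';' in ESCAPE state
theorem foldl_esc (s : List Char) : ∀ (reg txt : List Char),
    List.foldl stepA (txt, reg, .ESC) s =
      match PySem.List.index? s ';' with
      | none => (txt, reg ++ s, .ESC)
      | some k => List.foldl stepA (txt ++ escDecode (((reg ++ s.take (k + 1)).drop 1).dropLast), [], .TEXT) (s.drop (k + 1)) := by
  induction s with
  | nil => intro reg txt; simp
  | cons c t ih =>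
    intro reg txt
    by_cases hc : c = ';'
    · subst hc
      rw [PySem.List.index?_cons_self]
      simp [List.foldl, stepA]
    · rw [PySem.List.index?_cons_of_ne t hc]
      have hstep : List.foldl stepA (txt, reg, .ESC) (c :: t)
          = List.foldl stepA (txt, reg ++ [c], .ESC) t := by
        simp [List.foldl, stepA, hc]
      rw [hstep, ih]
      cases hk : PySem.List.index? t ';' with
      | none => simp
      | some k => simp [List.take_succ_cons, List.drop_succ_cons]

theorem index?_lt_length {c : Char} {s : List Char} {k : ℕ}
    (h : PySem.List.index? s c = some k) : k < s.length := by
  obtain ⟨hk, _⟩ := PySem.List.getElem_of_index?_eq_some h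
  exact hk

theorem main_text : ∀ (n : ℕ) (s : List Char), s.length ≤ n → ∀ (txt : List Char),
    (List.foldl stepA (txt, [], .TEXT) s).1 = txt ++ goB s := by
  intro n
  induction n with
  | zero =>
    intro s hs txt
    have : s = [] := List.eq_nil_of_length_eq_zero (Nat.le_zero.mp hs)
    subst this; simp [goB]
  | succ n ih =>
    intro s hs txt
    cases s with
    | nil => simp [goB]
    | cons c t =>
      by_cases hlt : c = '<'
      · subst hlt
        have hstep : List.foldl stepA (txt, [], .TEXT) ('<' :: t)
            = List.foldl stepA (txt, ['<'], .TAG) t := by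
          simp [List.foldl, stepA]
        rw [hstep, foldl_tag]
        cases hk : PySem.List.index? t '>' with
        | none =>
          have hidx : PySem.List.index? ('<' :: t) '>' = none := by
            rw [PySem.List.index?_cons_of_ne t (by decide), hk]; rfl
          rw [PySem.List.index?_eq_idxOf?] at hidx
          simp [goB, hidx]
        | some k =>
          have hidx : PySem.List.index? ('<' :: t) '>' = some (k + 1) := by
            rw [PySem.List.index?_cons_of_ne t (by decide), hk]; rfl
          have hlen : (t.drop (k + 1)).length ≤ n := by
            simp at hs ⊢; omega
          rw [ih _ hlen]
          simp only [goB]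
          rw [hidx]
          simp [List.take_succ_cons, List.drop_succ_cons]
      · by_cases hamp : c = '&'
        · subst hamp
          have hstep : List.foldl stepA (txt, [], .TEXT) ('&' :: t)
              = List.foldl stepA (txt, ['&'], .ESC) t := by
            simp [List.foldl, stepA]
          rw [hstep, foldl_esc]
          cases hk : PySem.List.index? t ';' with
          | none =>
            have hidx : PySem.List.index? ('&' :: t) ';' = none := by
              rw [PySem.List.index?_cons_of_ne t (by decide), hk]; rfl
            rw [PySem.List.index?_eq_idxOf?] at hidx
            simp [goB, hidx]
          | some k =>
            have hidx : PySem.List.index? ('&' :: t) ';' = some (k + 1) := by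
              rw [PySem.List.index?_cons_of_ne t (by decide), hk]; rfl
            have hklen : k < t.length := index?_lt_length hk
            have hlen : (t.drop (k + 1)).length ≤ n := by
              simp at hs ⊢; omega
            rw [ih _ hlen]
            simp only [goB]
            rw [hidx]
            have hdl : (t.take (k + 1)).dropLast = t.take k := by
              rcases Nat.lt_or_ge (k + 1) t.length with h | h
              · simpa using List.dropLast_take h
              · rw [List.take_of_length_le h, List.dropLast_eq_take]
                congr 1
                omega
            simp [List.take_succ_cons, List.drop_succ_cons, hdl]
        · have hstep : List.foldl stepA (txt, [], .TEXT) (c :: t)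
              = List.foldl stepA (txt ++ [c], [], .TEXT) t := by
            simp [List.foldl, stepA, hlt, hamp]
          rw [hstep, ih _ (by simp at hs ⊢; omega) (txt ++ [c])]
          simp [goB, hlt, hamp]

-- ===== VERDICT (by name: the statement is the Claim_ definition above) =====
theorem translate_html_spec : Claim_equal_translate_html := by
  intro s _
  show translate_html s = translate_html_alt s
  unfold translate_html translate_html_alt
  rw [unicodeToAscii_id, main_text s.toList.length s.toList le_rfl []]
  simp
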